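-- pv_equiv track=rewrite | github.com/WayneLin92/AlgTop | algebras/BU.py | virschiebung
-- ===== SOURCE A (Python) =====
-- def virschiebung(m):
--     """
--     Return the Virschiebung of the monomial.
--     Return None if it is zero~
--     """
--     if len(m) % 2 == 1:
--         return None
--     else:
--         result = [0] * (len(m) // 2)
--     for i in range(len(m)):
--         if i % 2 == 0:
--             if m[i] != 0:
--                 return None
--         else:
--             result[(i-1) // 2] = m[i]
--     return tuple(result)
-- ===== SOURCE B (Python) =====
-- def virschiebung(m):
--     """
--     Return the Virschiebung of the monomial.
--     Return None if it is zero~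
--     """
--     if len(m) % 2 == 1:
--         return None
--     if any(x != 0 for x in m[::2]):
--         return None
--     return tuple(m[1::2])
-- ===== Notes on version B (the rewrite author's own statement) =====
-- stated objective: simpler
-- what changed: Replaces the single interleaved index loop with manual (i-1)//2 write-index arithmetic into a preallocated list by two slice passes: check the even slice m[::2] for a nonzero entry, then return the odd slice m[1::2] directly.
import Mathlib
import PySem

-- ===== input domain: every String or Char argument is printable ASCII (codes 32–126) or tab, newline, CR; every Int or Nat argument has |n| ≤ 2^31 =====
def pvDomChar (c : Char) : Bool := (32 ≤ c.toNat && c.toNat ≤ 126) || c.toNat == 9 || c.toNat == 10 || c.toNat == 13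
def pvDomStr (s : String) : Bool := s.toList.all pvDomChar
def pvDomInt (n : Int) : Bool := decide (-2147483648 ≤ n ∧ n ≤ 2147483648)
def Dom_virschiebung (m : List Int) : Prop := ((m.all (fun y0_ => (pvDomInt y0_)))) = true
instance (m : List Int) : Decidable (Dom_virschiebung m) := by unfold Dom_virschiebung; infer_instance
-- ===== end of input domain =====

-- B replaces A's single interleaved index loop (manual (i-1)//2 writes into a
-- preallocated list) by two slice passes: check the even slice, return the odd slice.

-- ===== PORT A =====
-- the 'for i in range(len(m))' loop; i stays a Nat index into m (always 0 ≤ i < len, so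
-- getD is exact for m[i]); result[(i-1)//2] = m[i] is List.set at (i-1)/2
def virschiebungLoop (m : List Int) (res : List Int) (i : Nat) : Option (List Int) :=
  if i < m.length then
    if i % 2 == 0 then
      if m.getD i 0 ≠ 0 then none
      else virschiebungLoop m res (i + 1)
    else virschiebungLoop m (res.set ((i - 1) / 2) (m.getD i 0)) (i + 1)
  else some res
termination_by m.length - i

def virschiebung (m : List Int) : Option (List Int) :=
  if m.length % 2 == 1 then none
  else virschiebungLoop m (List.replicate (m.length / 2) 0) 0

-- ===== PORT B =====
-- hand port of the step-2 slice xs[::2] (PySem has no step slicing); exact for step 2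
def everyOther : List Int → List Int
  | [] => []
  | [a] => [a]
  | a :: _ :: rest => a :: everyOther rest

def virschiebung_alt (m : List Int) : Option (List Int) :=
  if m.length % 2 == 1 then none
  else if (everyOther m).any (fun x => x ≠ 0) then none
  else some (everyOther m.tail)

-- ===== PRECONDITION & SPEC =====
def Spec_virschiebung (m : List Int) (out : Option (List Int)) : Prop := out = virschiebung_alt m
instance (m : List Int) (out : Option (List Int)) : Decidable (Spec_virschiebung m out) := by unfold Spec_virschiebung; infer_instance

-- ===== CLAIM (what is proved, stated in full; the proofs are below) =====
def Claim_equal_virschiebung : Prop := ∀ (m : List Int), Dom_virschiebung m → Spec_virschiebung m (virschiebung m)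

-- ===== LEMMAS AND PROOFS =====

lemma everyOther_cons_cons (a b : Int) (l : List Int) :
    everyOther (a :: b :: l) = a :: everyOther l := rfl

lemma take_set_succ (res : List Int) (k : Nat) (v : Int) (hk : k < res.length) :
    (res.set k v).take (k + 1) = res.take k ++ [v] := by
  induction res generalizing k with
  | nil => simp at hk
  | cons a t ih =>
    cases k with
    | zero => simp
    | succ k =>
      simp only [List.set_cons_succ, List.take_succ_cons, List.cons_append]
      rw [ih k (by simpa using hk)]

lemma loop_invariant (m : List Int) : ∀ (k i : Nat) (res : List Int),
    m.length - i = k → m.length % 2 = 0 → i % 2 = 0 → i ≤ m.length →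
    res.length = m.length / 2 →
    virschiebungLoop m res i =
      if (everyOther (m.drop i)).any (fun x => x ≠ 0) then none
      else some (res.take (i / 2) ++ everyOther (m.drop i).tail) := by
  intro k
  induction k using Nat.strong_induction_on with
  | _ k IH =>
    intro i res hk hlen hie hile hres
    by_cases hlt : i < m.length
    · -- i even and length even, so i + 1 < length
      have h1 : i + 1 < m.length := by omega
      have h2 : (i + 1) % 2 = 1 := by omega
      have hgi : m.getD i 0 = m[i]'hlt := List.getD_eq_getElem _ _ hlt
      have hgi1 : m.getD (i+1) 0 = m[i+1]'h1 := List.getD_eq_getElem _ _ h1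
      have hdrop : m.drop i = m[i]'hlt :: m[i+1]'h1 :: m.drop (i+2) := by
        rw [List.drop_eq_getElem_cons hlt]
        congr 1
        rw [List.drop_eq_getElem_cons (by omega : i + 1 < m.length)]
      rw [virschiebungLoop, if_pos hlt, if_pos (by simp [hie] : (i % 2 == 0) = true),
        hgi, hdrop, everyOther_cons_cons]
      by_cases hz : m[i]'hlt ≠ 0
      · rw [if_pos hz]
        simp [hz]
      · push_neg at hz
        rw [if_neg (by simp [hz])]
        rw [virschiebungLoop, if_pos h1, if_neg (by simp [h2]), hgi1]
        have harg : (i + 1 - 1) / 2 = i / 2 := by omega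
        rw [harg]
        have hklt : i / 2 < res.length := by omega
        rw [IH (m.length - (i + 2)) (by omega) (i + 2) _ rfl hlen (by omega)
          (by omega) (by simp [hres])]
        have hEO : everyOther ((m[i]'hlt :: m[i+1]'h1 :: m.drop (i+2)).tail)
            = m[i+1]'h1 :: everyOther (m.drop (i+2)).tail := by
          show everyOther (m[i+1]'h1 :: m.drop (i+2)) = _
          rcases h : m.drop (i+2) with _ | ⟨a, l⟩
          · rfl
          · rw [everyOther_cons_cons]; rfl
        rw [hEO]
        have hdiv : (i + 2) / 2 = i / 2 + 1 := by omega
        rw [hdiv, take_set_succ res (i / 2) _ hklt]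
        simp [hz]
    · have hieq : i = m.length := by omega
      subst hieq
      rw [virschiebungLoop, if_neg hlt]
      have ht : res.take (m.length / 2) = res := List.take_of_length_le (by omega)
      simp [everyOther, ht]

-- ===== VERDICT (by name: the statement is the Claim_ definition above) =====
theorem virschiebung_spec : Claim_equal_virschiebung := by
  intro m _
  unfold Spec_virschiebung virschiebung virschiebung_alt
  by_cases h : m.length % 2 = 1
  · simp [h]
  · have h0 : m.length % 2 = 0 := by omega
    rw [if_neg (by simp [h0]), if_neg (by simp [h0])]
    rw [loop_invariant m (m.length - 0) 0 _ rfl h0 rfl (Nat.zero_le _) (by simp)]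
    simp
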